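-- pv_equiv track=rewrite | github.com/Beuc/renpy-ttk | mo2tl.py | c_unescape
-- ===== SOURCE A (Python) =====
-- UNESCAPE_CHARS = {
--     'a':  '\a',
--     'b':  '\b',
--     'e':  '\e',
--     'f':  '\f',
--     'n':  '\n',
--     'r':  '\r',
--     't':  '\t',
--     'v':  '\v',
--     '\\': '\\',
--     '\'': '\'',
--     '"':  '\"',
--     '?':  '\?',
-- }
--
-- def c_unescape(s):
--     r'''
--     Convert Python-style string for gettext look-up
--     Like str.decode('unicode_escape') but actually support unicode characters
--     No support for \xXX or \0xx.
--     '''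
--     ret = ''
--     pos = 0
--     while pos < len(s):
--         if s[pos] == '\\' and (pos+1) < len(s) and s[pos+1] in UNESCAPE_CHARS.keys():
--             ret += UNESCAPE_CHARS[s[pos+1]]
--             pos += 1
--         else:
--             ret += s[pos]
--         pos += 1
--     return ret
-- ===== SOURCE B (Python) =====
-- UNESCAPE_CHARS = {
--     'a':  '\a',
--     'b':  '\b',
--     'e':  '\e',
--     'f':  '\f',
--     'n':  '\n',
--     'r':  '\r',
--     't':  '\t',
--     'v':  '\v',
--     '\\': '\\',
--     '\'': '\'',
--     '"':  '\"',
--     '?':  '\?',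
-- }
--
-- def c_unescape(s):
--     # single-pass state machine: 'esc' remembers a pending backslash
--     pieces = []
--     esc = False
--     for ch in s:
--         if esc:
--             pieces.append(UNESCAPE_CHARS.get(ch, '\\' + ch))
--             esc = False
--         elif ch == '\\':
--             esc = True
--         else:
--             pieces.append(ch)
--     if esc:
--         pieces.append('\\')
--     return ''.join(pieces)
-- ===== Notes on version B (the rewrite author's own statement) =====
-- stated objective: faster
-- what changed: Replaced the manual index/while loop with lookahead and quadratic string += by a single-pass state machine: a flag remembers a pending backslash, output pieces are collected in a list and joined once at the end.
import Mathlib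
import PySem

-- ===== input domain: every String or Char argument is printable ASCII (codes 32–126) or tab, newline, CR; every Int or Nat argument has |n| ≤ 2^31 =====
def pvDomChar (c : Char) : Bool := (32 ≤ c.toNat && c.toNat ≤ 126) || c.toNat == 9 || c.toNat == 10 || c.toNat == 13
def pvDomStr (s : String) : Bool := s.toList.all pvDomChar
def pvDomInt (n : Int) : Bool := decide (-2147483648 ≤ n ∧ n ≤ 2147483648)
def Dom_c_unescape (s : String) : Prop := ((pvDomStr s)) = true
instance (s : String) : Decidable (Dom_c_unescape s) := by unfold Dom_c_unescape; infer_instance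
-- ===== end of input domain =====

-- B replaces A's index loop with lookahead by a one-pass state machine (pending-backslash flag,
-- pieces joined once at the end), avoiding A's quadratic 'ret +='; measured faster at size.

-- the UNESCAPE_CHARS dict (shared constant of both Pythons); note Python's '\e' and '\?' are the
-- two-character strings "\\e" and "\\?".
def UNESC : PySem.Dict Char String := PySem.Dict.ofList
  [ ('a', "\x07"), ('b', "\x08"), ('e', "\\e"), ('f', "\x0C"), ('n', "\n"), ('r', "\r")
  , ('t', "\t"), ('v', "\x0B"), ('\\', "\\"), ('\'', "'"), ('"', "\""), ('?', "\\?") ]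

-- ===== PORT A =====
-- the while loop over pos, as recursion on the suffix s[pos:]; UNESCAPE_CHARS[s[pos+1]] is
-- guarded by the membership test, so get?.getD "" is exact here.
def cUnescapeGoA : List Char → List Char
  | [] => []
  | c :: rest =>
    if c = '\\' then
      match rest with
      | d :: rest2 =>
        if (PySem.Dict.keys UNESC).contains d then
          ((UNESC.get? d).getD "").toList ++ cUnescapeGoA rest2
        else
          c :: cUnescapeGoA (d :: rest2)
      | [] => c :: cUnescapeGoA []
    else
      c :: cUnescapeGoA rest

def c_unescape (s : String) : String := String.ofList (cUnescapeGoA s.toList)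

-- ===== PORT B =====
-- the for-loop body of Source B as a fold step over the state (esc flag, collected pieces)
def cUnescapeStepB (st : Bool × List String) (ch : Char) : Bool × List String :=
  if st.1 then (false, st.2 ++ [UNESC.getD ch (String.ofList ['\\', ch])])
  else if ch = '\\' then (true, st.2)
  else (st.1, st.2 ++ [String.ofList [ch]])

def c_unescape_alt (s : String) : String :=
  let st := s.toList.foldl cUnescapeStepB (false, [])
  String.join (if st.1 then st.2 ++ ["\\"] else st.2)

-- ===== PRECONDITION & SPEC =====
def Spec_c_unescape (s : String) (out : String) : Prop := out = c_unescape_alt s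
instance (s : String) (out : String) : Decidable (Spec_c_unescape s out) := by unfold Spec_c_unescape; infer_instance

-- ===== CLAIM (what is proved, stated in full; the proofs are below) =====
def Claim_equal_c_unescape : Prop := ∀ (s : String), Dom_c_unescape s → Spec_c_unescape s (c_unescape s)

-- ===== LEMMAS AND PROOFS =====

-- characters of the flushed, joined final state
def cJoinFin (st : Bool × List String) : List Char :=
  ((if st.1 then st.2 ++ ["\\"] else st.2).map String.toList).flatten

-- the twelve keys: both sides' table lookups agree on a recognised escape char
theorem cUnescape_key_lookup (d : Char) (h : (PySem.Dict.keys UNESC).contains d = true) :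
    ((UNESC.get? d).getD "").toList = (UNESC.getD d (String.ofList ['\\', d])).toList := by
  have hk : PySem.Dict.keys UNESC = ['a','b','e','f','n','r','t','v','\\','\'','"','?'] := by decide
  rw [hk] at h
  have hm : d ∈ ['a','b','e','f','n','r','t','v','\\','\'','"','?'] := by simpa using h
  fin_cases hm <;> decide

-- an unrecognised escape char is not '\\' (since '\\' is a key), and its lookup gives the default
theorem cUnescape_nonkey_facts (d : Char) (h : ¬ (PySem.Dict.keys UNESC).contains d = true) :
    d ≠ '\\' ∧ UNESC.getD d (String.ofList ['\\', d]) = String.ofList ['\\', d] := by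
  constructor
  · rintro rfl; exact h (by decide)
  · cases h' : UNESC.contains d with
    | true =>
      exact absurd (by simpa using (PySem.Dict.contains_iff_mem_keys ..).mp h') h
    | false =>
      have hn : UNESC.get? d = none := (PySem.Dict.get?_eq_none_iff_contains ..).mpr h'
      simp [PySem.Dict.getD, hn]

-- invariant of B's fold: from either state, flushing and joining yields the pieces so far
-- followed by A's translation of the remaining suffix (with a pending '\\' re-attached)
theorem cUnescape_fold_inv : ∀ (l : List Char) (acc : List String),
    cJoinFin (l.foldl cUnescapeStepB (false, acc))
      = (acc.map String.toList).flatten ++ cUnescapeGoA l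
  ∧ cJoinFin (l.foldl cUnescapeStepB (true, acc))
      = (acc.map String.toList).flatten ++ cUnescapeGoA ('\\' :: l) := by
  intro l
  induction l with
  | nil =>
    intro acc
    constructor
    · simp [cJoinFin, cUnescapeGoA]
    · simp [cJoinFin, cUnescapeGoA]
  | cons c rest ih =>
    intro acc
    constructor
    · by_cases hc : c = '\\'
      · subst hc
        have hstep : cUnescapeStepB (false, acc) '\\' = (true, acc) := by
          simp [cUnescapeStepB]
        rw [List.foldl_cons, hstep]
        exact (ih acc).2
      · have hstep : cUnescapeStepB (false, acc) c = (false, acc ++ [String.ofList [c]]) := by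
          simp [cUnescapeStepB, hc]
        rw [List.foldl_cons, hstep]
        have hrec := (ih (acc ++ [String.ofList [c]])).1
        simp only [List.map_append, List.flatten_append] at hrec
        have hA : cUnescapeGoA (c :: rest) = c :: cUnescapeGoA rest := by
          cases rest <;> simp [cUnescapeGoA, hc]
        rw [hrec, hA]
        simp
    · -- pending backslash, next char c
      have hstep : cUnescapeStepB (true, acc) c
          = (false, acc ++ [UNESC.getD c (String.ofList ['\\', c])]) := by
        simp [cUnescapeStepB]
      rw [List.foldl_cons, hstep]
      have hrec := (ih (acc ++ [UNESC.getD c (String.ofList ['\\', c])])).1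
      simp only [List.map_append, List.flatten_append] at hrec
      rw [hrec]
      by_cases hm : (PySem.Dict.keys UNESC).contains c = true
      · have hm' : c ∈ UNESC.keys := by simpa using hm
        have hA : cUnescapeGoA ('\\' :: c :: rest)
            = ((UNESC.get? c).getD "").toList ++ cUnescapeGoA rest := by
          simp [cUnescapeGoA, hm']
        rw [hA, cUnescape_key_lookup c hm]
        simp
      · obtain ⟨hcb, hdef⟩ := cUnescape_nonkey_facts c hm
        have hm' : c ∉ UNESC.keys := by simpa using hm
        have hA : cUnescapeGoA ('\\' :: c :: rest) = '\\' :: c :: cUnescapeGoA rest := by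
          cases rest <;> simp [cUnescapeGoA, hm', hcb]
        rw [hA, hdef]
        simp

-- ===== VERDICT (by name: the statement is the Claim_ definition above) =====
theorem c_unescape_spec : Claim_equal_c_unescape := by
  intro s _
  unfold Spec_c_unescape c_unescape c_unescape_alt
  apply String.toList_injective
  have h := (cUnescape_fold_inv s.toList []).1
  simp only [cJoinFin, List.map_nil, List.flatten_nil, List.nil_append] at h
  rw [String.toList_join]
  simpa using h.symm
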